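-- pv_equiv track=rewrite | github.com/abdullahau/Data-Structures-and-Algorithms-Spring-2024 | Exercises/Week 3/forbidden.py | count
-- ===== SOURCE A (Python) =====
-- def count(s):
--     a = -1
--     result = 0
--     n = len(s)
--
--     for i in range(n):
--         if s[i] == "a":
--             a = i
--
--         result += i - a
--
--     return result
-- ===== SOURCE B (Python) =====
-- def tri(k):
--     return k * (k + 1) // 2
--
--
-- def count(s):
--     n = len(s)
--     pos = [i for i, c in enumerate(s) if c == "a"]
--     if not pos:
--         return tri(n)
--     bounds = pos + [n]
--     total = tri(pos[0])
--     for p, q in zip(bounds, bounds[1:]):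
--         total += tri(q - p - 1)
--     return total
-- ===== Notes on version B (the rewrite author's own statement) =====
-- stated objective: alternative
-- what changed: Replaces the per-character loop that accumulates i - last_a with a scan over the positions of 'a' only, summing closed-form triangular numbers for the block before the first 'a' and for each gap between consecutive 'a's (and to the end).
import Mathlib
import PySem

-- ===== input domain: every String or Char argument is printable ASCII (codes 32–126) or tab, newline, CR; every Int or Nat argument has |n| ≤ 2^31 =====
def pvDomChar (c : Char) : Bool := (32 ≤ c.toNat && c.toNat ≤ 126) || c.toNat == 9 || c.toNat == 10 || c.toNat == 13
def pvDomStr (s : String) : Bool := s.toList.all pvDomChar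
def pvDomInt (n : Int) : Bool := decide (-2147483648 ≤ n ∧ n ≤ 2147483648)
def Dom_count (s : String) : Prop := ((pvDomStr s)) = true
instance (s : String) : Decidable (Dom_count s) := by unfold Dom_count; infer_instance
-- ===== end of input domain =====

-- B replaces the per-character accumulation of i - last_a by closed-form triangular
-- numbers summed over the 'a' positions only (objective: alternative algorithm, same cost).

-- ===== PORT A =====
def count (s : String) : Int :=
  let n : Int := PySem.Str.len s
  let st : Int × Int :=
    (PySem.List.pyRange 0 n).foldl
      (fun st i =>
        let a : Int := if PySem.Str.pyGet? s i = some 'a' then i else st.1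
        (a, st.2 + (i - a)))
      (-1, 0)
  st.2

-- ===== PORT B =====
-- helper tri from Source B: k*(k+1)//2
def tri (k : Int) : Int := PySem.Int.floordiv (k * (k + 1)) 2

def count_alt (s : String) : Int :=
  let cs := s.toList
  let n : Int := (cs.length : Int)
  let pos : List Int :=
    (PySem.List.enumerate cs 0).filterMap (fun ic => if ic.2 = 'a' then some ic.1 else none)
  match pos with
  | [] => tri n
  | p0 :: _ =>
    let bounds := pos ++ [n]
    (List.zip bounds bounds.tail).foldl (fun acc pq => acc + tri (pq.2 - pq.1 - 1)) (tri p0)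

-- ===== PRECONDITION & SPEC =====
def Spec_count (s : String) (out : Int) : Prop := out = count_alt s
instance (s : String) (out : Int) : Decidable (Spec_count s out) := by unfold Spec_count; infer_instance

-- ===== CLAIM (what is proved, stated in full; the proofs are below) =====
def Claim_equal_count : Prop := ∀ (s : String), Dom_count s → Spec_count s (count s)

-- ===== LEMMAS AND PROOFS =====

-- common semantics: dsum cs d = Σ over chars of (distance to the last 'a', incoming distance d)
def dsum : List Char → Int → Int
  | [], _ => 0
  | c :: t, d => if c = 'a' then dsum t 1 else d + dsum t (d + 1)

-- positions of 'a' in cs, indices starting at k (the 'pos' list of B)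
def posFrom (cs : List Char) (k : Int) : List Int :=
  (PySem.List.enumerate cs k).filterMap (fun ic => if ic.2 = 'a' then some ic.1 else none)

-- segment sum of B: segs p qs = Σ tri(q - p' - 1) over consecutive bounds
def segs : Int → List Int → Int
  | _, [] => 0
  | p, q :: t => tri (q - p - 1) + segs q t

-- B's value on the suffix cs when the indices start at k
def BVal (k : Int) (cs : List Char) : Int :=
  match posFrom cs k with
  | [] => tri (cs.length : Int)
  | p0 :: ps => tri (p0 - k) + segs p0 (ps ++ [k + cs.length])

lemma tri_eq_of (k m : Int) (h : k * (k + 1) = m + m) : tri k = m := by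
  unfold tri
  rw [PySem.Int.floordiv_eq_iff_of_pos (by norm_num)]
  constructor <;> linarith

lemma tri_succ (k : Int) : tri (k + 1) = tri k + (k + 1) := by
  obtain ⟨m, hm⟩ := Int.even_mul_succ_self k
  rw [tri_eq_of k m hm, tri_eq_of (k + 1) (m + (k + 1)) (by ring_nf; ring_nf at hm; linarith)]

lemma tri_neg_one : tri (-1) = 0 := by decide

-- ===== A-side: the loop computes dsum =====
lemma A_loop (cs : List Char) : ∀ (pre : List Char) (s : String), s.toList = pre ++ cs →
    ∀ (a r : Int),
    ((PySem.List.pyRange (pre.length : Int) ((pre.length : Int) + (cs.length : Int))).foldl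
      (fun st i =>
        let a' : Int := if PySem.Str.pyGet? s i = some 'a' then i else st.1
        (a', st.2 + (i - a')))
      (a, r)).2
    = r + dsum cs ((pre.length : Int) - a) := by
  induction cs with
  | nil =>
    intro pre s hs a r
    simp [PySem.List.pyRange, dsum]
  | cons c t ih =>
    intro pre s hs a r
    have hlt : (pre.length : Int) < (pre.length : Int) + ((c :: t).length : Int) := by
      simp
    rw [PySem.List.pyRange_one_cons hlt]
    have hget : PySem.Str.pyGet? s (pre.length : Int) = some c := by
      simp [PySem.Str.pyGet?, hs]
    have harg : (pre.length : Int) + ((c :: t).length : Int)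
        = ((pre ++ [c]).length : Int) + (t.length : Int) := by simp; ring
    have hs' : s.toList = (pre ++ [c]) ++ t := by simp [hs]
    by_cases hc : c = 'a'
    · subst hc
      simp only [List.foldl_cons, hget, if_true]
      rw [show ((pre.length : Int) + 1) = ((pre ++ ['a']).length : Int) from by simp, harg,
        ih (pre ++ ['a']) s hs']
      simp [dsum]
    · simp only [List.foldl_cons, hget, Option.some.injEq]
      rw [if_neg hc]
      rw [show ((pre.length : Int) + 1) = ((pre ++ [c]).length : Int) from by simp, harg,
        ih (pre ++ [c]) s hs']
      have e : ((pre ++ [c]).length : Int) - a = ((pre.length : Int) - a) + 1 := by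
        simp; ring
      rw [e]
      simp [dsum, hc]
      ring

-- ===== B-side lemmas =====
lemma posFrom_nil (k : Int) : posFrom [] k = [] := by
  simp [posFrom, PySem.List.enumerate]

lemma posFrom_cons (c : Char) (t : List Char) (k : Int) :
    posFrom (c :: t) k = if c = 'a' then k :: posFrom t (k + 1) else posFrom t (k + 1) := by
  simp only [posFrom, PySem.List.enumerate_cons, List.filterMap_cons]
  split_ifs <;> simp_all

lemma posFrom_append_no_a (pre : List Char) (h : ∀ c ∈ pre, c ≠ 'a') :
    ∀ (rest : List Char) (k : Int), posFrom (pre ++ rest) k = posFrom rest (k + pre.length) := by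
  induction pre with
  | nil => intro rest k; simp
  | cons c p ih =>
    intro rest k
    have hc : c ≠ 'a' := h c (by simp)
    rw [List.cons_append, posFrom_cons, if_neg hc,
      ih (fun x hx => h x (by simp [hx])) rest (k + 1)]
    congr 1
    simp only [List.length_cons]
    push_cast
    omega

lemma dsum_append_no_a (pre : List Char) (h : ∀ c ∈ pre, c ≠ 'a') :
    ∀ (rest : List Char) (d : Int),
    dsum (pre ++ rest) d = (pre.length : Int) * d + tri ((pre.length : Int) - 1) + dsum rest (d + pre.length) := by
  induction pre with
  | nil => intro rest d; simp [tri_neg_one]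
  | cons c p ih =>
    intro rest d
    have hc : c ≠ 'a' := h c (by simp)
    have hrec := ih (fun x hx => h x (by simp [hx])) rest (d + 1)
    have harg : d + 1 + (p.length : Int) = d + ((c :: p).length : Int) := by simp; ring
    have htri : tri ((p.length : Int)) = tri ((p.length : Int) - 1) + (p.length : Int) := by
      have := tri_succ ((p.length : Int) - 1)
      simpa using this
    simp only [List.cons_append, dsum, if_neg hc]
    rw [hrec, harg]
    simp only [List.length_cons]
    push_cast
    have : tri ((p.length : Int) + 1 - 1) = tri ((p.length : Int) - 1) + (p.length : Int) := by
      simpa using htri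
    rw [this]
    ring

lemma fold_zip (bs : List Int) : ∀ (b acc : Int),
    (List.zip (b :: bs) bs).foldl (fun acc pq => acc + tri (pq.2 - pq.1 - 1)) acc = acc + segs b bs := by
  induction bs with
  | nil => intro b acc; simp [segs]
  | cons q t ih =>
    intro b acc
    simp only [List.zip_cons_cons, List.foldl_cons, segs]
    rw [ih q (acc + tri (q - b - 1))]
    ring

lemma segs_shift (t : List Char) (p : Int) :
    segs p (posFrom t (p + 1) ++ [p + 1 + (t.length : Int)]) = BVal (p + 1) t := by
  cases h : posFrom t (p + 1) with
  | nil => simp [BVal, h, segs]; congr 1; ring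
  | cons q0 qs =>
    simp only [BVal, h, List.cons_append, segs]
    congr 1
    ring_nf

lemma BVal_eq (n : Nat) : ∀ (cs : List Char), cs.length = n → ∀ (k : Int), BVal k cs = dsum cs 1 := by
  induction n using Nat.strong_induction_on with
  | _ n IH =>
    intro cs hlen k
    cases hdw : cs.dropWhile (fun c => c != 'a') with
    | nil =>
      -- cs has no 'a'
      have hcs : cs.takeWhile (fun c => c != 'a') = cs := by
        have := List.takeWhile_append_dropWhile (p := fun c => c != 'a') (l := cs)
        rw [hdw] at this; simpa using this
      have hno : ∀ c ∈ cs, c ≠ 'a' := by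
        intro c hc
        have := List.mem_takeWhile_imp (l := cs) (p := fun c => c != 'a') (by rw [hcs]; exact hc)
        simpa using this
      have hpos : posFrom cs k = [] := by
        have := posFrom_append_no_a cs hno [] k
        simpa [posFrom_nil] using this
      have hds : dsum cs 1 = tri (cs.length : Int) := by
        have := dsum_append_no_a cs hno [] 1
        have htri := tri_succ ((cs.length : Int) - 1)
        simp [dsum] at this
        rw [this]
        simp at htri
        omega
      rw [hds]
      simp [BVal, hpos]
    | cons c rest =>
      set pre := cs.takeWhile (fun c => c != 'a') with hpre
      have hsplit : pre ++ c :: rest = cs := by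
        rw [hpre, ← hdw]; exact List.takeWhile_append_dropWhile
      have hc : c = 'a' := by
        have hne : cs.dropWhile (fun c => c != 'a') ≠ [] := by rw [hdw]; simp
        have h1 := List.head_dropWhile_not (fun c => c != 'a') hne
        have h4 : (cs.dropWhile (fun c => c != 'a')).head? = some c := by rw [hdw]; rfl
        have h2 : (cs.dropWhile (fun c => c != 'a')).head hne = c :=
          Option.some.inj ((List.head?_eq_some_head hne).symm.trans h4)
        rw [h2] at h1
        simpa using h1
      subst hc
      have hnopre : ∀ x ∈ pre, x ≠ 'a' := by
        intro x hx
        rw [hpre] at hx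
        have := List.mem_takeWhile_imp hx
        simpa using this
      have hlenrest : rest.length < n := by
        rw [← hlen, ← hsplit]; simp; omega
      have hIH := IH rest.length hlenrest rest rfl (k + (pre.length : Int) + 1)
      -- left side
      have hpos : posFrom cs k = (k + (pre.length : Int)) :: posFrom rest (k + (pre.length : Int) + 1) := by
        rw [← hsplit, posFrom_append_no_a pre hnopre, posFrom_cons, if_pos rfl]
      have hbound : k + (cs.length : Int) = (k + (pre.length : Int)) + 1 + (rest.length : Int) := by
        rw [← hsplit]; simp; ring
      have hshift := segs_shift rest (k + (pre.length : Int))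
      have hleft : BVal k cs = tri (pre.length : Int) + dsum rest 1 := by
        simp only [BVal, hpos, hbound]
        rw [hshift, hIH]
        congr 2
        ring
      -- right side
      have hright : dsum cs 1 = tri (pre.length : Int) + dsum rest 1 := by
        rw [← hsplit, dsum_append_no_a pre hnopre]
        have htri := tri_succ ((pre.length : Int) - 1)
        simp only [dsum, reduceIte]
        simp at htri
        omega
      rw [hleft, hright]

lemma count_alt_eq_BVal (s : String) : count_alt s = BVal 0 s.toList := by
  cases h : posFrom s.toList 0 with
  | nil =>
    simp only [count_alt, BVal]
    rw [show (PySem.List.enumerate s.toList 0).filterMap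
        (fun ic => if ic.2 = 'a' then some ic.1 else none) = posFrom s.toList 0 from rfl, h]
  | cons p0 ps =>
    simp only [count_alt, BVal]
    rw [show (PySem.List.enumerate s.toList 0).filterMap
        (fun ic => if ic.2 = 'a' then some ic.1 else none) = posFrom s.toList 0 from rfl, h]
    simp only [List.cons_append, List.tail_cons]
    rw [fold_zip (ps ++ [(s.toList.length : Int)]) p0 (tri p0)]
    simp

-- ===== VERDICT (by name: the statement is the Claim_ definition above) =====
theorem count_spec : Claim_equal_count := by
  intro s _
  unfold Spec_count
  have hA := A_loop s.toList [] s (by simp) (-1) 0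
  simp only [List.length_nil, Nat.cast_zero, zero_add] at hA
  have hcount : count s = dsum s.toList 1 := by
    unfold count
    rw [PySem.Str.len_eq]
    rw [hA]
    norm_num
  rw [hcount, count_alt_eq_BVal, BVal_eq s.toList.length s.toList rfl 0]
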